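-- pv_equiv track=rewrite | github.com/belse-de/github-actions-tools | github_actions_simulate_matrix.py | exclude_jobs
-- ===== SOURCE A (Python) =====
-- def check_var_is_list_of_dicts(var, name):
--     if not isinstance(var, list):
--         raise ValueError(f" Argument {name} must be a list of dictionaries.")
--     if not all(isinstance(entry, dict) for entry in var):
--         raise ValueError("Each entry in argument {name} must be a dictionary.")
--
-- def exclude_jobs(job_list: list[dict], excludes: list[dict]) -> list[dict]:
--     check_var_is_list_of_dicts(job_list, 'job_list')
--     check_var_is_list_of_dicts(excludes, 'excludes')
--
--     if not excludes:
--         return job_list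
--
--     def is_not_matching_dict(dict_to_match: dict):
--         def func(dic):
--             dic_to_compare = {k: v for k, v in dic.items() if k in dict_to_match}
--             return dic_to_compare != dict_to_match
--         return func
--
--     new_job_list = job_list
--     for exclude in excludes:
--         new_job_list = list(filter(is_not_matching_dict(exclude), new_job_list))
--
--     return new_job_list
-- ===== SOURCE B (Python) =====
-- def exclude_jobs(job_list: list[dict], excludes: list[dict]) -> list[dict]:
--     if not isinstance(job_list, list) or not all(isinstance(e, dict) for e in job_list):
--         raise ValueError(" Argument job_list must be a list of dictionaries.")
--     if not isinstance(excludes, list) or not all(isinstance(e, dict) for e in excludes):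
--         raise ValueError(" Argument excludes must be a list of dictionaries.")
--     return [job for job in job_list
--             if not any(all(k in job and job[k] == v for k, v in ex.items())
--                        for ex in excludes)]
-- ===== Notes on version B (the rewrite author's own statement) =====
-- stated objective: simpler
-- what changed: Single pass over the jobs testing each exclude's keys directly against the job dict (any/all membership test), instead of A's one filter pass per exclude that rebuilds the whole job list and constructs and compares a projected sub-dict for every job/exclude pair.
import Mathlib
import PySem

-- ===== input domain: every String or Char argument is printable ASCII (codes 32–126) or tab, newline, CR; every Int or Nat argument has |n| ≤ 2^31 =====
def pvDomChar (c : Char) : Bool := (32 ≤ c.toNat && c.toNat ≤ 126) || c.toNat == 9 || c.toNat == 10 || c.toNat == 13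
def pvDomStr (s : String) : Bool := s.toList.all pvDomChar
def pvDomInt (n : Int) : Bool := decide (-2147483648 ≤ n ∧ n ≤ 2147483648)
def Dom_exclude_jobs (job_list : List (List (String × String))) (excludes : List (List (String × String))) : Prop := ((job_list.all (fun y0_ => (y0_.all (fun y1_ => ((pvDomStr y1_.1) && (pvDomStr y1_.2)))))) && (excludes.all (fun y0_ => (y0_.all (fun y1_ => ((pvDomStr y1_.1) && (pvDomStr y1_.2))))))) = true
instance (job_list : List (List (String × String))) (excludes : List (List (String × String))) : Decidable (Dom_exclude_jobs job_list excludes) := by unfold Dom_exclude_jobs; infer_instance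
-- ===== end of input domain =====

-- B replaces A's one-filter-pass-per-exclude (each building a projected sub-dict and comparing
-- dicts) with a single pass over the jobs that tests each exclude's key/value pairs directly
-- against the job; objective: simpler. Return-value equivalence only (neither side mutates).

-- ===== PORT A =====
-- Python dict == (order-insensitive): same number of items and every key maps to the same value.
def pvDictEq (d1 d2 : PySem.Dict String String) : Bool :=
  d1.items.length == d2.items.length && d1.items.all (fun kv => d2.get? kv.1 == some kv.2)

-- is_not_matching_dict(dict_to_match)(dic): build {k: v for k, v in dic.items() if k in dict_to_match}, compare != dict_to_match
def pvIsNotMatching (dict_to_match : PySem.Dict String String) (dic : PySem.Dict String String) : Bool :=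
  let dic_to_compare : PySem.Dict String String :=
    PySem.Dict.mk (dic.items.filter (fun kv => dict_to_match.contains kv.1))
  !(pvDictEq dic_to_compare dict_to_match)

def exclude_jobs (job_list : List (List (String × String))) (excludes : List (List (String × String))) : List (List (String × String)) :=
  -- marshalling: each Python dict argument arrives as its item list; rebuild the dict
  let jobs := job_list.map PySem.Dict.ofList
  let exs := excludes.map PySem.Dict.ofList
  if excludes.isEmpty then jobs.map (·.items)
  else
    (exs.foldl (fun new_job_list exclude => new_job_list.filter (pvIsNotMatching exclude)) jobs).map (·.items)

-- ===== PORT B =====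
def exclude_jobs_alt (job_list : List (List (String × String))) (excludes : List (List (String × String))) : List (List (String × String)) :=
  let exs := excludes.map PySem.Dict.ofList
  ((job_list.map PySem.Dict.ofList).filter (fun job =>
    !(exs.any (fun ex => ex.items.all (fun kv => job.get? kv.1 == some kv.2))))).map (·.items)

-- ===== PRECONDITION & SPEC =====
def Spec_exclude_jobs (job_list : List (List (String × String))) (excludes : List (List (String × String))) (out : List (List (String × String))) : Prop := out = exclude_jobs_alt job_list excludes
instance (job_list : List (List (String × String))) (excludes : List (List (String × String))) (out : List (List (String × String))) : Decidable (Spec_exclude_jobs job_list excludes out) := by unfold Spec_exclude_jobs; infer_instance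

-- ===== CLAIM (what is proved, stated in full; the proofs are below) =====
def Claim_equal_exclude_jobs : Prop := ∀ (job_list : List (List (String × String))) (excludes : List (List (String × String))), Dom_exclude_jobs job_list excludes → Spec_exclude_jobs job_list excludes (exclude_jobs job_list excludes)

-- ===== LEMMAS AND PROOFS =====

-- pointwise: A's "projected sub-dict equals the exclude" is B's "every exclude pair is in the job",
-- provided both dicts have Nodup keys (true for dicts built by Dict.ofList).
theorem pvMatch_eq (ex j : PySem.Dict String String)
    (hex : ex.keys.Nodup) (hj : j.keys.Nodup) :
    pvDictEq (PySem.Dict.mk (j.items.filter (fun kv => ex.contains kv.1))) ex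
      = ex.items.all (fun kv => j.get? kv.1 == some kv.2) := by
  have hkeys : ∀ d : PySem.Dict String String, d.keys = d.items.map Prod.fst := by
    intro d; simp [PySem.Dict.keys]
  set F := j.items.filter (fun kv => ex.contains kv.1) with hF
  have hFsub : F ⊆ j.items := (List.filter_sublist).subset
  have hFkeysnd : (F.map Prod.fst).Nodup := by
    have hsl : List.Sublist (F.map Prod.fst) (j.items.map Prod.fst) :=
      (List.filter_sublist).map _
    exact (hkeys j ▸ hj).sublist hsl
  simp only [pvDictEq]
  cases hall : ex.items.all (fun kv => j.get? kv.1 == some kv.2)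
  · -- some exclude pair (k,v) is not in the job: show the Bool lhs is false
    rw [List.all_eq_false] at hall
    obtain ⟨⟨k, v⟩, hkv, hne⟩ := hall
    simp only [beq_iff_eq] at hne
    by_contra hcontra
    rw [Bool.not_eq_false, Bool.and_eq_true, beq_iff_eq, List.all_eq_true] at hcontra
    obtain ⟨hlen, hvals⟩ := hcontra
    -- keys of F ⊆ keys of ex, Nodup, equal length ⇒ k ∈ keys of F
    have hsub : F.map Prod.fst ⊆ ex.items.map Prod.fst := by
      intro x hx
      obtain ⟨⟨k', v'⟩, hk'F, rfl⟩ := List.mem_map.mp hx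
      have : ex.contains k' = true := (List.mem_filter.mp hk'F).2
      have := (PySem.Dict.contains_iff_mem_keys ex k').mp this
      rwa [hkeys ex] at this
    have hperm : (F.map Prod.fst).Perm (ex.items.map Prod.fst) :=
      (hFkeysnd.subperm hsub).perm_of_length_le (by simp [hlen])
    have hkF : k ∈ F.map Prod.fst := hperm.mem_iff.mpr (by exact List.mem_map.mpr ⟨(k, v), hkv, rfl⟩)
    obtain ⟨⟨k', v'⟩, hk'F, hk'⟩ := List.mem_map.mp hkF
    cases hk'
    have hjget : j.get? k' = some v' := PySem.Dict.get?_of_mem_items j (hFsub hk'F) hj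
    have hexget : ex.get? k' = some v' := by
      have := hvals _ hk'F; simpa using this
    have hexget2 : ex.get? k' = some v := PySem.Dict.get?_of_mem_items ex hkv hex
    rw [hexget2] at hexget
    exact hne (by rw [hjget]; exact congrArg _ (Option.some.inj hexget).symm)
  · -- every exclude pair is in the job: lhs is true
    rw [List.all_eq_true] at hall
    have hmem : ∀ kv : String × String, kv ∈ ex.items → kv ∈ F := by
      rintro ⟨k, v⟩ hkv
      have hjget : j.get? k = some v := by
        have := hall _ hkv; simpa using this
      refine List.mem_filter.mpr ⟨(PySem.Dict.get?_eq_some_iff_mem_items j k v hj).mp hjget, ?_⟩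
      exact (PySem.Dict.contains_iff_mem_keys ex k).mpr
        (by rw [hkeys ex]; exact List.mem_map.mpr ⟨(k, v), hkv, rfl⟩)
    have hsub2 : ex.items.map Prod.fst ⊆ F.map Prod.fst := by
      intro x hx
      obtain ⟨kv, hkv, rfl⟩ := List.mem_map.mp hx
      exact List.mem_map.mpr ⟨kv, hmem kv hkv, rfl⟩
    have hsub : F.map Prod.fst ⊆ ex.items.map Prod.fst := by
      intro x hx
      obtain ⟨⟨k', v'⟩, hk'F, rfl⟩ := List.mem_map.mp hx
      have : ex.contains k' = true := (List.mem_filter.mp hk'F).2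
      have := (PySem.Dict.contains_iff_mem_keys ex k').mp this
      rwa [hkeys ex] at this
    have hperm : (F.map Prod.fst).Perm (ex.items.map Prod.fst) :=
      (hFkeysnd.subperm hsub).perm_of_length_le
        (((hkeys ex ▸ hex).subperm hsub2).length_le)
    have hlen : F.length = ex.items.length := by
      have := hperm.length_eq; simpa using this
    simp only [Bool.and_eq_true, beq_iff_eq, List.all_eq_true]
    refine ⟨hlen, ?_⟩
    rintro ⟨k, v⟩ hkvF
    have hkex : ex.contains k = true := (List.mem_filter.mp hkvF).2
    have hkmem : k ∈ ex.keys := (PySem.Dict.contains_iff_mem_keys ex k).mp hkex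
    rw [hkeys ex] at hkmem
    obtain ⟨⟨k', w⟩, hkw, hk'⟩ := List.mem_map.mp hkmem
    cases hk'
    have hjget : j.get? k' = some v := PySem.Dict.get?_of_mem_items j (hFsub hkvF) hj
    have hjget2 : j.get? k' = some w := by
      have := hall _ hkw; simpa using this
    have : v = w := Option.some.inj (hjget ▸ hjget2)
    subst this
    simpa using PySem.Dict.get?_of_mem_items ex hkw hex

-- loop shape: A's E successive filter passes are one filter by the conjunction
theorem foldl_filter_eq_filter_all {α β : Type} (exs : List α) (p : α → β → Bool) (l : List β) :
    exs.foldl (fun acc e => acc.filter (p e)) l = l.filter (fun x => exs.all (fun e => p e x)) := by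
  induction exs generalizing l with
  | nil => simp
  | cons e es ih => simp [ih, List.filter_filter, Bool.and_comm]

-- ===== VERDICT (by name: the statement is the Claim_ definition above) =====
theorem exclude_jobs_spec : Claim_equal_exclude_jobs := by
  intro job_list excludes _
  unfold Spec_exclude_jobs exclude_jobs exclude_jobs_alt
  cases hE : excludes.isEmpty
  · rw [if_neg (by simp), foldl_filter_eq_filter_all]
    congr 1
    apply List.filter_congr
    intro j hj
    obtain ⟨jl, _, rfl⟩ := List.mem_map.mp hj
    rw [List.all_eq_not_any_not]
    congr 1
    apply PySem.List.any_congr_mem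
    intro e he
    obtain ⟨el, _, rfl⟩ := List.mem_map.mp he
    simp only [pvIsNotMatching, Bool.not_not]
    exact pvMatch_eq _ _ (PySem.Dict.nodup_keys_ofList el) (PySem.Dict.nodup_keys_ofList jl)
  · have : excludes = [] := List.isEmpty_iff.mp hE
    subst this
    simp
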